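-- pv_equiv track=rewrite | github.com/lusm554/codewars-kata | 6-kyu/dashatize-it.py | dashatize
-- ===== SOURCE A (Python) =====
-- def dashatize(n):
--   res = ''
--   for d in str(abs(n)):
--     if int(d) % 2 != 0:
--       res += f'-{d}-'
--     else:
--       res += d
--   res = res.replace('--', '-').strip('-')
--   return res
-- ===== SOURCE B (Python) =====
-- def dashatize(n):
--     parts = []
--     prev_odd = None
--     for d in str(abs(n)):
--         odd = int(d) % 2 != 0
--         if prev_odd is not None and (prev_odd or odd):
--             parts.append('-')
--         parts.append(d)
--         prev_odd = odd
--     return ''.join(parts)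
-- ===== Notes on version B (the rewrite author's own statement) =====
-- stated objective: simpler
-- what changed: A wraps every odd digit in dashes and then post-processes the whole string (replace('--','-') and strip('-')); B does one pass over the digits, emitting a single dash in a gap iff either adjacent digit is odd, so no collapse/strip passes are needed.
import Mathlib
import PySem

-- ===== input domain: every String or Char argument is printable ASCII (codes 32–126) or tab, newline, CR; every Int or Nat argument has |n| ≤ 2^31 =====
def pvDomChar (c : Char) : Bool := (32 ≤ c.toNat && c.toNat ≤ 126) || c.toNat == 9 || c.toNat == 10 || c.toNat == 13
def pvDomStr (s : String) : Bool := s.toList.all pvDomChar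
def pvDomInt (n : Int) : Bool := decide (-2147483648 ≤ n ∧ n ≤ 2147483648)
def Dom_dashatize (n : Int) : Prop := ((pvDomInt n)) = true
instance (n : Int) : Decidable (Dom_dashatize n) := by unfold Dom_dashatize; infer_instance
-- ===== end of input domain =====

-- B replaces A's wrap-each-odd-digit / collapse "--" / strip "-" pipeline by a single pass that
-- decides per gap between adjacent digits whether to emit one dash (iff either neighbour is odd):
-- simpler, no post-processing passes.

-- ===== PORT A =====
-- int(d) % 2 != 0 for a single-char string d; d is always a decimal digit here, so int(d)
-- never raises and the getD default is never taken.
def pvOdd (d : Char) : Bool := PySem.Int.mod ((PySem.Int.ofChars? [d]).getD 0) 2 != 0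

def dashatize (n : Int) : String :=
  PySem.Str.stripChars
    (PySem.Str.replace
      ((PySem.Int.toStr |n|).toList.foldl
        (fun res d =>
          res ++ (if pvOdd d then String.ofList ['-', d, '-'] else String.ofList [d])) "")
      "--" "-")
    "-"

-- ===== PORT B =====
def dashatize_alt (n : Int) : String :=
  PySem.Str.join ""
    ((PySem.Int.toStr |n|).toList.foldl
      (fun (st : List String × Option Bool) d =>
        let odd := pvOdd d
        let parts :=
          match st.2 with
          | none => st.1
          | some p => if p || odd then st.1 ++ ["-"] else st.1
        (parts ++ [String.ofList [d]], some odd))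
      ([], none)).1

-- ===== PRECONDITION & SPEC =====
def Spec_dashatize (n : Int) (out : String) : Prop := out = dashatize_alt n
instance (n : Int) (out : String) : Decidable (Spec_dashatize n out) := by unfold Spec_dashatize; infer_instance

-- ===== CLAIM (what is proved, stated in full; the proofs are below) =====
def Claim_equal_dashatize : Prop := ∀ (n : Int), Dom_dashatize n → Spec_dashatize n (dashatize n)

-- ===== LEMMAS AND PROOFS =====

-- A's loop body, on the char-list level
def wrapL (ds : List Char) : List Char :=
  ds.flatMap (fun d => if pvOdd d then ['-', d, '-'] else [d])

-- what replace "--" "-" computes, as a structural recursion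
def rep : List Char → List Char
  | [] => []
  | [c] => [c]
  | a :: b :: t => if a = '-' ∧ b = '-' then '-' :: rep t else a :: rep (b :: t)

-- B's output after the first digit, given the previous digit's parity p
def bodyFrom (p : Bool) : List Char → List Char
  | [] => []
  | d :: t => (if p || pvOdd d then ['-'] else []) ++ d :: bodyFrom (pvOdd d) t

-- parity of the last digit (p if the list is empty)
def lastOdd (p : Bool) : List Char → Bool
  | [] => p
  | d :: t => lastOdd (pvOdd d) t

theorem digitChar_ne_dash (n : Nat) : Nat.digitChar n ≠ '-' := by
  rcases Nat.lt_or_ge n 16 with h16 | h16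
  · interval_cases n <;> decide
  · have h : Nat.digitChar n = '*' := by
      unfold Nat.digitChar
      rw [if_neg (by omega), if_neg (by omega), if_neg (by omega), if_neg (by omega),
          if_neg (by omega), if_neg (by omega), if_neg (by omega), if_neg (by omega),
          if_neg (by omega), if_neg (by omega), if_neg (by omega), if_neg (by omega),
          if_neg (by omega), if_neg (by omega), if_neg (by omega), if_neg (by omega)]
    rw [h]; decide

theorem toDigitsCore_no_dash (fuel n : Nat) (acc : List Char)
    (h : ∀ c ∈ acc, c ≠ '-') : ∀ c ∈ Nat.toDigitsCore 10 fuel n acc, c ≠ '-' := by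
  induction fuel generalizing n acc with
  | zero => simpa [Nat.toDigitsCore] using h
  | succ fuel ih =>
    have hacc : ∀ c ∈ (n % 10).digitChar :: acc, c ≠ '-' := by
      intro c hc
      rw [List.mem_cons] at hc
      rcases hc with rfl | hc
      · exact digitChar_ne_dash _
      · exact h c hc
    simp only [Nat.toDigitsCore]
    split
    · exact hacc
    · exact ih _ _ hacc

theorem toChars_abs_no_dash (n : Int) :
    ∀ c ∈ (PySem.Int.toStr |n|).toList, c ≠ '-' := by
  have h0 : ¬ (|n| < 0) := not_lt.mpr (abs_nonneg n)
  simp only [PySem.Int.toList_toStr, PySem.Int.toChars, if_neg h0, Nat.toDigits]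
  exact toDigitsCore_no_dash _ _ [] (by simp)

-- A's foldl builds the wrapped list
theorem foldl_wrap (ds : List Char) (res : String) :
    (ds.foldl
      (fun res d =>
        res ++ (if pvOdd d then String.ofList ['-', d, '-'] else String.ofList [d])) res).toList
      = res.toList ++ wrapL ds := by
  induction ds generalizing res with
  | nil => simp [wrapL]
  | cons d t ih =>
    simp only [List.foldl_cons, ih, wrapL, List.flatMap_cons]
    by_cases h : pvOdd d <;> simp [h]

-- two evaluation rules for rep
theorem rep_cons_ne (d : Char) (hd : d ≠ '-') (X : List Char) : rep (d :: X) = d :: rep X := by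
  cases X with
  | nil => simp [rep]
  | cons b t => simp [rep, hd]

theorem rep_dd (t : List Char) : rep ('-' :: '-' :: t) = '-' :: rep t := by simp [rep]

theorem rep_dx (d : Char) (hd : d ≠ '-') (t : List Char) :
    rep ('-' :: d :: t) = '-' :: rep (d :: t) := by simp [rep, hd]

-- replace.go with enough fuel is rep
theorem go_eq_rep (fuel : Nat) (l acc : List Char) (h : l.length ≤ fuel) :
    PySem.Chars.replace.go ['-', '-'] ['-'] fuel l acc = acc.reverse ++ rep l := by
  induction fuel generalizing l acc with
  | zero =>
    have : l = [] := by cases l <;> simp_all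
    subst this; simp [PySem.Chars.replace.go, rep]
  | succ fuel ih =>
    match l with
    | [] => simp [PySem.Chars.replace.go, rep]
    | [c] =>
      have hpre : ¬ (['-', '-'].isPrefixOf [c] = true) := by
        simp [List.isPrefixOf]
      simp only [PySem.Chars.replace.go, if_neg hpre]
      rw [ih [] (c :: acc) (by simp)]
      simp [rep]
    | a :: b :: t =>
      by_cases hd : a = '-' ∧ b = '-'
      · obtain ⟨ha, hb⟩ := hd; subst ha; subst hb
        have hpre : ['-', '-'].isPrefixOf ('-' :: '-' :: t) = true := by
          simp [List.isPrefixOf]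
        simp only [PySem.Chars.replace.go, if_pos hpre, List.length_cons, List.length_nil,
          List.drop_succ_cons, List.drop_zero, List.reverse_singleton, List.singleton_append]
        rw [ih t ('-' :: acc) (by simp at h ⊢; omega)]
        simp [rep_dd]
      · have hpre : ¬ (['-', '-'].isPrefixOf (a :: b :: t) = true) := by
          intro hcon
          rw [List.isPrefixOf_iff_prefix] at hcon
          rcases List.cons_prefix_cons.mp hcon with ⟨ha, hcon2⟩
          rcases List.cons_prefix_cons.mp hcon2 with ⟨hb, -⟩
          exact hd ⟨ha.symm, hb.symm⟩
        simp only [PySem.Chars.replace.go, if_neg hpre]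
        rw [ih (b :: t) (a :: acc) (by simp at h ⊢; omega)]
        simp [rep, if_neg hd]

theorem replace_eq_rep (l : List Char) :
    PySem.Chars.replace l ['-', '-'] ['-'] = rep l := by
  simp only [PySem.Chars.replace]
  rw [if_neg (by simp)]
  simpa using go_eq_rep l.length l [] le_rfl

-- the collapsed wrap, with a pending dash iff p, is bodyFrom plus a trailing dash iff the last digit is odd
theorem rep_wrap (t : List Char) (hnd : ∀ c ∈ t, c ≠ '-') (p : Bool) :
    rep ((if p then ['-'] else []) ++ wrapL t)
      = bodyFrom p t ++ (if lastOdd p t then ['-'] else []) := by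
  induction t generalizing p with
  | nil => cases p <;> simp [wrapL, rep, bodyFrom, lastOdd]
  | cons d t ih =>
    have hd : d ≠ '-' := hnd d (by simp)
    have hnd' : ∀ c ∈ t, c ≠ '-' := fun c hc => hnd c (by simp [hc])
    have ihF : rep (wrapL t) = bodyFrom false t ++ (if lastOdd false t then ['-'] else []) := by
      simpa using ih hnd' false
    have ihT : rep ('-' :: wrapL t) = bodyFrom true t ++ (if lastOdd true t then ['-'] else []) := by
      simpa using ih hnd' true
    have hw : wrapL (d :: t) = (if pvOdd d then ['-', d, '-'] else [d]) ++ wrapL t := by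
      simp [wrapL]
    have e1 : ∀ (X Y : List Char), (if false = true then X else Y) = Y := fun _ _ => rfl
    have e2 : ∀ (X Y : List Char), (if true = true then X else Y) = X := fun _ _ => rfl
    rw [hw]
    cases p <;> cases ho : pvOdd d <;>
      simp only [e1, e2, if_true, if_false, List.nil_append, List.cons_append, List.append_assoc,
        List.singleton_append, bodyFrom, lastOdd, ho, Bool.false_or, Bool.true_or, Bool.or_false,
        Bool.or_true]
    · rw [rep_cons_ne d hd, ihF]
    · rw [rep_dx d hd, rep_cons_ne d hd, ihT]
    · rw [rep_dx d hd, rep_cons_ne d hd, ihF]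
    · rw [rep_dd, rep_cons_ne d hd, ihT]

-- d :: bodyFrom p t reversed starts with a non-dash char
theorem reverse_body_head (t : List Char) (hnd : ∀ c ∈ t, c ≠ '-') (p : Bool)
    (d : Char) (hd : d ≠ '-') :
    ∃ e r, (d :: bodyFrom p t).reverse = e :: r ∧ e ≠ '-' := by
  induction t generalizing p d with
  | nil => exact ⟨d, [], by simp [bodyFrom], hd⟩
  | cons c t ih =>
    obtain ⟨e, r, her, he⟩ := ih (fun x hx => hnd x (by simp [hx])) (pvOdd c) c (hnd c (by simp))
    refine ⟨e, r ++ ((if p || pvOdd c then ['-'] else []) ++ [d]), ?_, he⟩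
    have hsplit : d :: bodyFrom p (c :: t)
        = (d :: (if p || pvOdd c then ['-'] else [])) ++ (c :: bodyFrom (pvOdd c) t) := by
      simp [bodyFrom]
    rw [hsplit, List.reverse_append, her]
    split_ifs <;> simp

-- stripping dashes from both ends leaves exactly the head digit and the body
theorem strip_final (t : List Char) (hnd : ∀ c ∈ t, c ≠ '-') (q : Bool)
    (d : Char) (hd : d ≠ '-') (pre : List Char) (hpre : pre = ['-'] ∨ pre = []) :
    PySem.Chars.stripChars
      (pre ++ ((d :: bodyFrom (pvOdd d) t) ++ (if q then ['-'] else [])))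
      ['-'] = d :: bodyFrom (pvOdd d) t := by
  obtain ⟨e, r, her, he⟩ := reverse_body_head t hnd (pvOdd d) d hd
  simp only [PySem.Chars.stripChars]
  have h1 : List.dropWhile (fun c => ['-'].contains c)
      (pre ++ ((d :: bodyFrom (pvOdd d) t) ++ (if q then ['-'] else [])))
      = (d :: bodyFrom (pvOdd d) t) ++ (if q then ['-'] else []) := by
    rcases hpre with h | h <;> subst h <;> simp [List.dropWhile, hd]
  rw [h1]
  have h2 : ((d :: bodyFrom (pvOdd d) t) ++ (if q then ['-'] else [])).reverse
      = (if q then ['-'] else []) ++ e :: r := by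
    rw [List.reverse_append, her]; cases q <;> simp
  rw [h2]
  have h3 : List.dropWhile (fun c => ['-'].contains c) ((if q then ['-'] else []) ++ e :: r)
      = e :: r := by cases q <;> simp [List.dropWhile, he]
  rw [h3, ← her, List.reverse_reverse]

-- B's loop, after the first digit
theorem foldl_body (t : List Char) (parts : List String) (p : Bool) :
    (t.foldl
      (fun (st : List String × Option Bool) d =>
        let odd := pvOdd d
        let parts :=
          match st.2 with
          | none => st.1
          | some p => if p || odd then st.1 ++ ["-"] else st.1
        (parts ++ [String.ofList [d]], some odd))
      (parts, some p)).1
      = parts ++ (bodyFrom p t).map (fun c => String.ofList [c]) := by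
  induction t generalizing parts p with
  | nil => simp [bodyFrom]
  | cons d t ih =>
    have h1 : ((d :: t).foldl
        (fun (st : List String × Option Bool) d =>
          let odd := pvOdd d
          let parts :=
            match st.2 with
            | none => st.1
            | some p => if p || odd then st.1 ++ ["-"] else st.1
          (parts ++ [String.ofList [d]], some odd))
        (parts, some p))
        = (t.foldl
          (fun (st : List String × Option Bool) d =>
            let odd := pvOdd d
            let parts :=
              match st.2 with
              | none => st.1
              | some p => if p || odd then st.1 ++ ["-"] else st.1
            (parts ++ [String.ofList [d]], some odd))
          ((if p || pvOdd d then parts ++ ["-"] else parts) ++ [String.ofList [d]],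
            some (pvOdd d))) := rfl
    rw [h1, ih]
    by_cases h : (p || pvOdd d) = true <;> simp [bodyFrom, h]

-- ===== VERDICT (by name: the statement is the Claim_ definition above) =====
theorem dashatize_spec : Claim_equal_dashatize := by
  intro n _
  unfold Spec_dashatize dashatize dashatize_alt
  apply String.ext
  have hnd := toChars_abs_no_dash n
  cases hds : (PySem.Int.toStr |n|).toList with
  | nil =>
    simp only [List.foldl_nil]
    rfl
  | cons d t =>
    rw [hds] at hnd
    have hd : d ≠ '-' := hnd d (by simp)
    have hnd' : ∀ c ∈ t, c ≠ '-' := fun c hc => hnd c (by simp [hc])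
    -- A side
    rw [PySem.Str.toList_stripChars, PySem.Str.toList_replace, foldl_wrap]
    rw [show ("--" : String).toList = ['-', '-'] from rfl,
        show ("-" : String).toList = ['-'] from rfl,
        show ("" : String).toList ++ wrapL (d :: t) = wrapL (d :: t) by simp]
    rw [replace_eq_rep]
    have hA : rep (wrapL (d :: t))
        = (if pvOdd d then ['-'] else []) ++ d :: bodyFrom (pvOdd d) t
          ++ (if lastOdd (pvOdd d) t then ['-'] else []) := by
      have := rep_wrap (d :: t) hnd false
      simp only [if_neg (by simp : ¬ (false = true)), List.nil_append] at this
      rw [this]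
      simp [bodyFrom, lastOdd]
    rw [hA, List.append_assoc,
        strip_final t hnd' (lastOdd (pvOdd d) t) d hd
          (if pvOdd d = true then ['-'] else [])
          (by by_cases h : pvOdd d = true <;> simp [h])]
    -- B side
    have hstep : ((d :: t).foldl
        (fun (st : List String × Option Bool) d =>
          let odd := pvOdd d
          let parts :=
            match st.2 with
            | none => st.1
            | some p => if p || odd then st.1 ++ ["-"] else st.1
          (parts ++ [String.ofList [d]], some odd))
        ([], none))
        = (t.foldl
          (fun (st : List String × Option Bool) d =>
            let odd := pvOdd d
            let parts :=
              match st.2 with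
              | none => st.1
              | some p => if p || odd then st.1 ++ ["-"] else st.1
            (parts ++ [String.ofList [d]], some odd))
          ([String.ofList [d]], some (pvOdd d))) := rfl
    rw [hstep, foldl_body, PySem.Str.toList_join]
    rw [show ("" : String).toList = ([] : List Char) by decide]
    have hmap : List.map String.toList
        ([String.ofList [d]] ++ (bodyFrom (pvOdd d) t).map (fun c => String.ofList [c]))
        = (d :: bodyFrom (pvOdd d) t).map (fun c => [c]) := by
      simp [List.map_map, Function.comp]
    rw [hmap, PySem.Chars.join_nil_singletons]
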